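-- pv_equiv track=rewrite | github.com/deoliveiralf/scripts-tools-to-run-in-galaxy | exactSearch.py | is_base_match
-- ===== SOURCE A (Python) =====
-- IUPAC_DEGENERATE = {
--     'A': ['A'],
--     'C': ['C'],
--     'G': ['G'],
--     'T': ['T'],
--     'U': ['U', 'T'],  # Treat U (RNA) as T (DNA)
--     'R': ['A', 'G'],  # Purine
--     'Y': ['C', 'T'],  # Pyrimidine
--     'S': ['G', 'C'],  # Strong
--     'W': ['A', 'T'],  # Weak
--     'K': ['G', 'T'],  # Keto
--     'M': ['A', 'C'],  # Amino
--     'B': ['C', 'G', 'T'],  # Not A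
--     'D': ['A', 'G', 'T'],  # Not C
--     'H': ['A', 'C', 'T'],  # Not G
--     'V': ['A', 'C', 'G'],  # Not T
--     'N': ['A', 'C', 'G', 'T'],  # Any base
--     '-': ['-']  # Gap
-- }
--
-- def is_base_match(query_base, target_base):
--     """
--     Check if two bases match considering degenerate IUPAC codes
--     """
--     query_base = query_base.upper()
--     target_base = target_base.upper()
--
--     # If either base is not in our mapping, assume they don't match
--     if query_base not in IUPAC_DEGENERATE or target_base not in IUPAC_DEGENERATE:
--         return query_base == target_base
--
--     # Get the possible bases for each position
--     query_options = IUPAC_DEGENERATE[query_base]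
--     target_options = IUPAC_DEGENERATE[target_base]
--
--     # Check for overlap in possible bases
--     return any(base in target_options for base in query_options)
-- ===== SOURCE B (Python) =====
-- # Table-driven: the whole match relation is precomputed as a set of 2-letter
-- # pair strings, so a call is one membership test -- no per-code option sets and
-- # no overlap scan at run time.
-- IUPAC_CODES = set("ACGTURYSWKMBDHVN-")
-- MATCH_PAIRS = frozenset(
--     "AA AR AW AM AD AH AV AN CC CY CS CM CB CH CV CN GG GR GS GK GB GD GV GN "
--     "TT TU TY TW TK TB TD TH TN UT UU UY UW UK UB UD UH UN RA RG RR RS RW RK "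
--     "RM RB RD RH RV RN YC YT YU YY YS YW YK YM YB YD YH YV YN SC SG SR SY SS "
--     "SK SM SB SD SH SV SN WA WT WU WR WY WW WK WM WB WD WH WV WN KG KT KU KR "
--     "KY KS KW KK KB KD KH KV KN MA MC MR MY MS MW MM MB MD MH MV MN BC BG BT "
--     "BU BR BY BS BW BK BM BB BD BH BV BN DA DG DT DU DR DY DS DW DK DM DB DD "
--     "DH DV DN HA HC HT HU HR HY HS HW HK HM HB HD HH HV HN VA VC VG VR VY VS "
--     "VW VK VM VB VD VH VV VN NA NC NG NT NU NR NY NS NW NK NM NB ND NH NV NN "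
--     "--".split()
-- )
--
-- def is_base_match(query_base, target_base):
--     q = query_base.upper()
--     t = target_base.upper()
--     if q in IUPAC_CODES and t in IUPAC_CODES:
--         return q + t in MATCH_PAIRS
--     return q == t
-- ===== Notes on version B (the rewrite author's own statement) =====
-- stated objective: alternative
-- what changed: Replaces the per-code option-list dict and the any()-overlap scan by a fully precomputed relation: a frozenset of all 193 matching 2-letter code pairs, so a call is a single pair-string membership test (with A's equality fallback for non-IUPAC symbols).
import Mathlib
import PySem

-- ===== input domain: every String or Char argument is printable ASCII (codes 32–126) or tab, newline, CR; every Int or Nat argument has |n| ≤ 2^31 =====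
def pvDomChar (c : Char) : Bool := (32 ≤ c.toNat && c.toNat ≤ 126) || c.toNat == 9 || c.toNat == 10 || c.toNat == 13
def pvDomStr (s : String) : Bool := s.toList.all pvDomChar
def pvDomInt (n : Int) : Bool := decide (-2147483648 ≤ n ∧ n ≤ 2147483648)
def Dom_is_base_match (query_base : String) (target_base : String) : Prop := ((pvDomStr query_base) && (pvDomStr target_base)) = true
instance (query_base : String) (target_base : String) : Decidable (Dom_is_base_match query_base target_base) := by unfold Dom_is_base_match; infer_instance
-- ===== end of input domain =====

-- B precomputes the whole match relation as a set of 2-letter pair strings, so a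
-- call is one membership test instead of A's option-list overlap scan (objective:
-- alternative; not claimed faster).

-- ===== PORT A =====
def IUPAC_DEGENERATE : PySem.Dict String (List String) := PySem.Dict.mk
  [("A", ["A"]), ("C", ["C"]), ("G", ["G"]), ("T", ["T"]),
   ("U", ["U", "T"]), ("R", ["A", "G"]), ("Y", ["C", "T"]), ("S", ["G", "C"]),
   ("W", ["A", "T"]), ("K", ["G", "T"]), ("M", ["A", "C"]), ("B", ["C", "G", "T"]),
   ("D", ["A", "G", "T"]), ("H", ["A", "C", "T"]), ("V", ["A", "C", "G"]),
   ("N", ["A", "C", "G", "T"]), ("-", ["-"])]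

def is_base_match (query_base : String) (target_base : String) : Bool :=
  let q := PySem.Str.upper query_base
  let t := PySem.Str.upper target_base
  if !(IUPAC_DEGENERATE.contains q) || !(IUPAC_DEGENERATE.contains t) then
    q == t
  else
    -- the [] default is never used: both lookups are on contained keys
    let query_options := IUPAC_DEGENERATE.getD q []
    let target_options := IUPAC_DEGENERATE.getD t []
    query_options.any (fun base => target_options.contains base)

-- ===== PORT B =====
-- set("ACGTURYSWKMBDHVN-"): Python iterates the string's characters, each a 1-char str
def IUPAC_CODES : PySem.Set String := PySem.Set.ofList
  ["A", "C", "G", "T", "U", "R", "Y", "S", "W", "K", "M", "B", "D", "H", "V", "N", "-"]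

def MATCH_PAIRS : PySem.Set String := PySem.Set.ofList
  ["AA","AR","AW","AM","AD","AH","AV","AN","CC","CY","CS","CM","CB","CH","CV","CN",
   "GG","GR","GS","GK","GB","GD","GV","GN","TT","TU","TY","TW","TK","TB","TD","TH",
   "TN","UT","UU","UY","UW","UK","UB","UD","UH","UN","RA","RG","RR","RS","RW","RK",
   "RM","RB","RD","RH","RV","RN","YC","YT","YU","YY","YS","YW","YK","YM","YB","YD",
   "YH","YV","YN","SC","SG","SR","SY","SS","SK","SM","SB","SD","SH","SV","SN","WA",
   "WT","WU","WR","WY","WW","WK","WM","WB","WD","WH","WV","WN","KG","KT","KU","KR",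
   "KY","KS","KW","KK","KB","KD","KH","KV","KN","MA","MC","MR","MY","MS","MW","MM",
   "MB","MD","MH","MV","MN","BC","BG","BT","BU","BR","BY","BS","BW","BK","BM","BB",
   "BD","BH","BV","BN","DA","DG","DT","DU","DR","DY","DS","DW","DK","DM","DB","DD",
   "DH","DV","DN","HA","HC","HT","HU","HR","HY","HS","HW","HK","HM","HB","HD","HH",
   "HV","HN","VA","VC","VG","VR","VY","VS","VW","VK","VM","VB","VD","VH","VV","VN",
   "NA","NC","NG","NT","NU","NR","NY","NS","NW","NK","NM","NB","ND","NH","NV","NN",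
   "--"]

def is_base_match_alt (query_base : String) (target_base : String) : Bool :=
  let q := PySem.Str.upper query_base
  let t := PySem.Str.upper target_base
  if PySem.Set.contains IUPAC_CODES q && PySem.Set.contains IUPAC_CODES t then
    PySem.Set.contains MATCH_PAIRS (q ++ t)
  else
    q == t

-- ===== PRECONDITION & SPEC =====
def Spec_is_base_match (query_base : String) (target_base : String) (out : Bool) : Prop := out = is_base_match_alt query_base target_base
instance (query_base : String) (target_base : String) (out : Bool) : Decidable (Spec_is_base_match query_base target_base out) := by unfold Spec_is_base_match; infer_instance

-- ===== CLAIM (what is proved, stated in full; the proofs are below) =====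
def Claim_equal_is_base_match : Prop := ∀ (query_base : String) (target_base : String), Dom_is_base_match query_base target_base → Spec_is_base_match query_base target_base (is_base_match query_base target_base)

-- ===== LEMMAS AND PROOFS =====

lemma codes_eval : IUPAC_CODES =
    ["A", "C", "G", "T", "U", "R", "Y", "S", "W", "K", "M", "B", "D", "H", "V", "N", "-"] := by
  decide

-- the dict's key test and B's code-set test agree (same 17 keys, same order)
lemma contains_same (s : String) :
    PySem.Set.contains IUPAC_CODES s = IUPAC_DEGENERATE.contains s := by
  rw [Bool.eq_iff_iff, PySem.Set.contains_iff, PySem.Dict.contains_iff_mem_keys, codes_eval]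
  simp [IUPAC_DEGENERATE]

lemma keys_of_contains (s : String) (h : IUPAC_DEGENERATE.contains s = true) :
    s ∈ (["A", "C", "G", "T", "U", "R", "Y", "S", "W", "K", "M", "B", "D", "H", "V", "N", "-"] : List String) := by
  have := (PySem.Dict.contains_iff_mem_keys (d := IUPAC_DEGENERATE) (k := s)).mp h
  simpa [IUPAC_DEGENERATE] using this

set_option maxRecDepth 8000 in
set_option maxHeartbeats 1000000 in
-- the two dispatch-and-compute bodies agree on arbitrary (already-uppercased) strings
lemma core_eq (u v : String) :
    (if !(IUPAC_DEGENERATE.contains u) || !(IUPAC_DEGENERATE.contains v) then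
      u == v
    else
      (IUPAC_DEGENERATE.getD u []).any (fun base => (IUPAC_DEGENERATE.getD v []).contains base)) =
    (if PySem.Set.contains IUPAC_CODES u && PySem.Set.contains IUPAC_CODES v then
      PySem.Set.contains MATCH_PAIRS (u ++ v)
    else
      u == v) := by
  by_cases hu : IUPAC_DEGENERATE.contains u = true
  · by_cases hv : IUPAC_DEGENERATE.contains v = true
    · have hu' := keys_of_contains u hu
      have hv' := keys_of_contains v hv
      simp only [List.mem_cons, List.not_mem_nil, or_false] at hu' hv'
      rcases hu' with rfl|rfl|rfl|rfl|rfl|rfl|rfl|rfl|rfl|rfl|rfl|rfl|rfl|rfl|rfl|rfl|rfl <;>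
        rcases hv' with rfl|rfl|rfl|rfl|rfl|rfl|rfl|rfl|rfl|rfl|rfl|rfl|rfl|rfl|rfl|rfl|rfl <;>
        decide
    · simp only [contains_same]
      simp [hu, hv]
  · simp only [contains_same]
    simp [hu]

-- ===== VERDICT (by name: the statement is the Claim_ definition above) =====
theorem is_base_match_spec : Claim_equal_is_base_match := by
  intro q t _
  unfold Spec_is_base_match is_base_match is_base_match_alt
  exact core_eq (PySem.Str.upper q) (PySem.Str.upper t)
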